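-- pv_equiv track=rewrite | github.com/JohnsonAndrewSiziba/ReadAnywhere | FinancialInstitutionsMgt/app/src/main/assets/script.py | addModal
-- ===== SOURCE A (Python) =====
-- def addModal(data):
-- 	if("</body>" in data):
-- 		out = ""
-- 		counter = 0
-- 		static_string = """ <div class="container">
-- 		   <!-- Modal -->
-- 		   <div class="modal fade" id="myModal" role="dialog">
-- 			  <div class="modal-dialog">
-- 				 <!-- Modal content-->
-- 				 <div class="modal-content">
-- 				    <div class="modal-header">
-- 				       <button type="button" class="close" data-dismiss="modal">&times;</button>
-- 				       <h4 class="modal-title">Chapters</h4>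
-- 				    </div>
-- 				    <div class="modal-body">
-- 				       <ul class="toc chapters">
-- 						<li class="heading">Bank Management Tutorial</li>
-- 						<li><a href="index.htm">Bank Management – Home</a></li>
-- 						<li><a href="bank_management_introduction.htm">Bank Management - Introduction</a></li>
-- 						<li><a href="bank_management_commercial_banking.htm">Bank Mngmt - Commercial Banking</a></li>
-- 						<li><a href="bank_management_commercial_banking_functions.htm">Commercial Banking Functions</a></li>
-- 						<li><a href="bank_management_commercial_banking_reforms.htm">Commercial Banking Reforms</a></li>
-- 						<li><a href="bank_management_liquidity.htm">Bank Management – Liquidity</a></li>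
-- 						<li><a href="bank_management_liquidity_theory.htm">Liquidity Management Theory</a></li>
-- 						<li><a href="bank_management_liabilities_theory.htm">Liabilities Management Theory</a></li>
-- 						<li><a href="bank_management_basle_norms.htm">Bank Management – Basle Norms</a></li>
-- 						<li><a href="bank_management_credit.htm">Bank Mngmt – Credit Management</a></li>
-- 						<li><a href="bank_management_formulating_loan_policy.htm">Formulating Loan Policy</a></li>
-- 						<li><a href="bank_management_asset_liability.htm">Bank Mngmt – Asset Liability Mngmt</a></li>
-- 						<li><a href="bank_management_evolution_of_alm.htm">Bank Mngmt – Evolution Of ALM</a></li>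
-- 						<li><a href="bank_management_risks_with_assets.htm">Bank Mngmt – Risks With Assets</a></li>
-- 						<li><a href="bank_management_risks_measurement_techniques.htm">Risk Measurement Techniques</a></li>
-- 						<li><a href="bank_management_marketing.htm">Bank Management – Bank Marketing</a></li>
-- 						<li><a href="bank_management_relationship.htm">Bank Mngmt – Relationship Banking</a></li>
-- 						</ul>
-- 						<ul class="toc chapters">
-- 						<li class="heading">Bank Management Resources</li>
-- 						<li><a href="bank_management_quick_guide.htm">Bank Management - Quick Guide</a></li>
-- 						</ul>
-- 				    </div>
-- 				    <div class="modal-footer">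
-- 				       <button type="button" class="btn btn-default" data-dismiss="modal">Close</button>
-- 				    </div>
-- 				 </div>
--
-- 			  </div>
-- 		   </div>
--
-- 		</div> """
--
-- 		data = data.split("</body>")
-- 		for s in data:
-- 			if(counter == 0):
-- 				s += static_string + "\n</body>"
-- 			out += s
-- 			counter += 1
-- 		return out
-- 	else:
-- 		return data
-- ===== SOURCE B (Python) =====
-- def addModal(data):
-- 	static_string = """ <div class="container">
-- 		   <!-- Modal -->
-- 		   <div class="modal fade" id="myModal" role="dialog">
-- 			  <div class="modal-dialog">
-- 				 <!-- Modal content-->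
-- 				 <div class="modal-content">
-- 				    <div class="modal-header">
-- 				       <button type="button" class="close" data-dismiss="modal">&times;</button>
-- 				       <h4 class="modal-title">Chapters</h4>
-- 				    </div>
-- 				    <div class="modal-body">
-- 				       <ul class="toc chapters">
-- 						<li class="heading">Bank Management Tutorial</li>
-- 						<li><a href="index.htm">Bank Management – Home</a></li>
-- 						<li><a href="bank_management_introduction.htm">Bank Management - Introduction</a></li>
-- 						<li><a href="bank_management_commercial_banking.htm">Bank Mngmt - Commercial Banking</a></li>
-- 						<li><a href="bank_management_commercial_banking_functions.htm">Commercial Banking Functions</a></li>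
-- 						<li><a href="bank_management_commercial_banking_reforms.htm">Commercial Banking Reforms</a></li>
-- 						<li><a href="bank_management_liquidity.htm">Bank Management – Liquidity</a></li>
-- 						<li><a href="bank_management_liquidity_theory.htm">Liquidity Management Theory</a></li>
-- 						<li><a href="bank_management_liabilities_theory.htm">Liabilities Management Theory</a></li>
-- 						<li><a href="bank_management_basle_norms.htm">Bank Management – Basle Norms</a></li>
-- 						<li><a href="bank_management_credit.htm">Bank Mngmt – Credit Management</a></li>
-- 						<li><a href="bank_management_formulating_loan_policy.htm">Formulating Loan Policy</a></li>
-- 						<li><a href="bank_management_asset_liability.htm">Bank Mngmt – Asset Liability Mngmt</a></li>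
-- 						<li><a href="bank_management_evolution_of_alm.htm">Bank Mngmt – Evolution Of ALM</a></li>
-- 						<li><a href="bank_management_risks_with_assets.htm">Bank Mngmt – Risks With Assets</a></li>
-- 						<li><a href="bank_management_risks_measurement_techniques.htm">Risk Measurement Techniques</a></li>
-- 						<li><a href="bank_management_marketing.htm">Bank Management – Bank Marketing</a></li>
-- 						<li><a href="bank_management_relationship.htm">Bank Mngmt – Relationship Banking</a></li>
-- 						</ul>
-- 						<ul class="toc chapters">
-- 						<li class="heading">Bank Management Resources</li>
-- 						<li><a href="bank_management_quick_guide.htm">Bank Management - Quick Guide</a></li>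
-- 						</ul>
-- 				    </div>
-- 				    <div class="modal-footer">
-- 				       <button type="button" class="btn btn-default" data-dismiss="modal">Close</button>
-- 				    </div>
-- 				 </div>
--
-- 			  </div>
-- 		   </div>
--
-- 		</div> """
-- 	head, sep, tail = data.partition("</body>")
-- 	if not sep:
-- 		return data
-- 	return head + static_string + "\n</body>" + tail.replace("</body>", "")
-- ===== Notes on version B (the rewrite author's own statement) =====
-- stated objective: simpler
-- what changed: Replaces the split-into-pieces loop with a counter by a single partition at the first </body> plus one replace that strips later </body> tags from the tail.
import Mathlib
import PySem

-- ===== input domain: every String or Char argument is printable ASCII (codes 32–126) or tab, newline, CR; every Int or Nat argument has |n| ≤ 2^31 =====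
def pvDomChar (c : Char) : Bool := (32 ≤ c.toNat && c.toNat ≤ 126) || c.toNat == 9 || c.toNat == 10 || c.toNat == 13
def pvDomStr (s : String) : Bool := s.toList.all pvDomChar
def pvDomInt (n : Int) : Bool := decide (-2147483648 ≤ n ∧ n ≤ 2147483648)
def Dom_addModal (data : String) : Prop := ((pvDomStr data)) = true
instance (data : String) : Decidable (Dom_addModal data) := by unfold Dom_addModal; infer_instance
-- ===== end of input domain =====

-- B replaces A's split-into-pieces loop with one partition at the first "</body>" plus a replace
-- that strips the later "</body>" tags from the tail (objective: simpler).

-- the static_string literal shared by both Pythons (byte-identical to the source)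
def pvStatic : String := " <div class=\"container\">\n\t\t   <!-- Modal -->\n\t\t   <div class=\"modal fade\" id=\"myModal\" role=\"dialog\">\n\t\t\t  <div class=\"modal-dialog\">\n\t\t\t\t <!-- Modal content-->\n\t\t\t\t <div class=\"modal-content\">\n\t\t\t\t    <div class=\"modal-header\">\n\t\t\t\t       <button type=\"button\" class=\"close\" data-dismiss=\"modal\">&times;</button>\n\t\t\t\t       <h4 class=\"modal-title\">Chapters</h4>\n\t\t\t\t    </div>\n\t\t\t\t    <div class=\"modal-body\">\n\t\t\t\t       <ul class=\"toc chapters\">\n\t\t\t\t\t\t<li class=\"heading\">Bank Management Tutorial</li>\n\t\t\t\t\t\t<li><a href=\"index.htm\">Bank Management – Home</a></li>\n\t\t\t\t\t\t<li><a href=\"bank_management_introduction.htm\">Bank Management - Introduction</a></li>\n\t\t\t\t\t\t<li><a href=\"bank_management_commercial_banking.htm\">Bank Mngmt - Commercial Banking</a></li>\n\t\t\t\t\t\t<li><a href=\"bank_management_commercial_banking_functions.htm\">Commercial Banking Functions</a></li>\n\t\t\t\t\t\t<li><a href=\"bank_management_commercial_banking_reforms.htm\">Commercial Banking Reforms</a></li>\n\t\t\t\t\t\t<li><a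 href=\"bank_management_liquidity.htm\">Bank Management – Liquidity</a></li>\n\t\t\t\t\t\t<li><a href=\"bank_management_liquidity_theory.htm\">Liquidity Management Theory</a></li>\n\t\t\t\t\t\t<li><a href=\"bank_management_liabilities_theory.htm\">Liabilities Management Theory</a></li>\n\t\t\t\t\t\t<li><a href=\"bank_management_basle_norms.htm\">Bank Management – Basle Norms</a></li>\n\t\t\t\t\t\t<li><a href=\"bank_management_credit.htm\">Bank Mngmt – Credit Management</a></li>\n\t\t\t\t\t\t<li><a href=\"bank_management_formulating_loan_policy.htm\">Formulating Loan Policy</a></li>\n\t\t\t\t\t\t<li><a href=\"bank_management_asset_liability.htm\">Bank Mngmt – Asset Liability Mngmt</a></li>\n\t\t\t\t\t\t<li><a href=\"bank_management_evolution_of_alm.htm\">Bank Mngmt – Evolution Of ALM</a></li>\n\t\t\t\t\t\t<li><a href=\"bank_management_risks_with_assets.htm\">Bank Mngmt – Risks With Assets</a></li>\n\t\t\t\t\t\t<li><a href=\"bank_management_risks_measurement_techniques.htm\">Risk Measurement Techniques</a></li>\n\t\t\t\t\t\t<li><a href=\"bank_management_marketing.htm\">Bank Management – Bank Marketing</a></li>\n\t\t\t\t\t\t<li><a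 href=\"bank_management_relationship.htm\">Bank Mngmt – Relationship Banking</a></li>\n\t\t\t\t\t\t</ul>\n\t\t\t\t\t\t<ul class=\"toc chapters\">\n\t\t\t\t\t\t<li class=\"heading\">Bank Management Resources</li>\n\t\t\t\t\t\t<li><a href=\"bank_management_quick_guide.htm\">Bank Management - Quick Guide</a></li>\n\t\t\t\t\t\t</ul>\n\t\t\t\t    </div>\n\t\t\t\t    <div class=\"modal-footer\">\n\t\t\t\t       <button type=\"button\" class=\"btn btn-default\" data-dismiss=\"modal\">Close</button>\n\t\t\t\t    </div>\n\t\t\t\t </div>\n\n\t\t\t  </div>\n\t\t   </div>\n\n\t\t</div> "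

-- ===== PORT A =====
-- the body of A's 'for s in data: if counter == 0: s += static_string + "\n</body>"; out += s; counter += 1'
def addModalStep (st : List Char × Int) (s : List Char) : List Char × Int :=
  (st.1 ++ (if st.2 == 0 then s ++ pvStatic.toList ++ "\n</body>".toList else s), st.2 + 1)

def addModal (data : String) : String :=
  if PySem.Str.isIn "</body>" data then
    -- out = ""; counter = 0; data = data.split("</body>"); loop; return out
    String.ofList ((PySem.Chars.splitOn data.toList "</body>".toList).foldl addModalStep ([], 0)).1
  else data

-- ===== PORT B =====
-- head, sep, tail = data.partition("</body>"); partition is ported by hand (exact): the first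
-- occurrence index via find, head = everything before it, tail = everything after the separator.
def addModal_alt (data : String) : String :=
  if PySem.Chars.find data.toList "</body>".toList == -1 then
    data   -- sep == "" from partition: separator absent, return data unchanged
  else
    String.ofList
      (data.toList.take (PySem.Chars.find data.toList "</body>".toList).toNat ++
       pvStatic.toList ++ "\n</body>".toList ++
       PySem.Chars.replace
         (data.toList.drop ((PySem.Chars.find data.toList "</body>".toList).toNat +
           "</body>".toList.length)) "</body>".toList [])

-- ===== PRECONDITION & SPEC =====
def Spec_addModal (data : String) (out : String) : Prop := out = addModal_alt data
instance (data : String) (out : String) : Decidable (Spec_addModal data out) := by unfold Spec_addModal; infer_instance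

-- ===== CLAIM (what is proved, stated in full; the proofs are below) =====
def Claim_equal_addModal : Prop := ∀ (data : String), Dom_addModal data → Spec_addModal data (addModal data)

-- ===== LEMMAS AND PROOFS =====

-- unfolding equations for the fuelled go-loops inside PySem.Chars.replace / splitOn / find

theorem repGo_zero (old new l acc : List Char) :
    PySem.Chars.replace.go old new 0 l acc = acc.reverse ++ l := by
  rw [PySem.Chars.replace.go]

theorem repGo_nil (old new acc : List Char) (f : Nat) :
    PySem.Chars.replace.go old new (f+1) [] acc = acc.reverse := by
  rw [PySem.Chars.replace.go]; omega

theorem repGo_cons (old new acc t : List Char) (c : Char) (f : Nat) :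
    PySem.Chars.replace.go old new (f+1) (c :: t) acc =
      if old.isPrefixOf (c :: t) then
        PySem.Chars.replace.go old new f (List.drop old.length (c :: t)) (new.reverse ++ acc)
      else PySem.Chars.replace.go old new f t (c :: acc) := by
  rw [PySem.Chars.replace.go]

theorem splitGo_zero (sep cur l : List Char) (acc : List (List Char)) :
    PySem.Chars.splitOn.go sep 0 l cur acc = ((cur.reverse ++ l) :: acc).reverse := by
  rw [PySem.Chars.splitOn.go]

theorem splitGo_nil (sep cur : List Char) (acc : List (List Char)) (f : Nat) :
    PySem.Chars.splitOn.go sep (f+1) [] cur acc = (cur.reverse :: acc).reverse := by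
  rw [PySem.Chars.splitOn.go]; omega

theorem splitGo_cons (sep cur t : List Char) (c : Char) (acc : List (List Char)) (f : Nat) :
    PySem.Chars.splitOn.go sep (f+1) (c :: t) cur acc =
      if sep.isPrefixOf (c :: t) then
        PySem.Chars.splitOn.go sep f (List.drop sep.length (c :: t)) [] (cur.reverse :: acc)
      else PySem.Chars.splitOn.go sep f t (c :: cur) acc := by
  rw [PySem.Chars.splitOn.go]

theorem findGo_nil (sub : List Char) (k : Nat) :
    PySem.Chars.find.go sub [] k = if sub.isEmpty then (k : Int) else -1 := by
  rw [PySem.Chars.find.go]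

theorem findGo_cons (sub t : List Char) (c : Char) (k : Nat) :
    PySem.Chars.find.go sub (c :: t) k =
      if sub.isPrefixOf (c :: t) then (k : Int) else PySem.Chars.find.go sub t (k+1) := by
  rw [PySem.Chars.find.go]

-- accumulator extraction for replace.go
theorem rep_acc (old new : List Char) : ∀ (fuel : Nat) (l acc : List Char),
    PySem.Chars.replace.go old new fuel l acc = acc.reverse ++ PySem.Chars.replace.go old new fuel l []
  | 0, l, acc => by simp [repGo_zero]
  | f+1, [], acc => by simp [repGo_nil]
  | f+1, c :: t, acc => by
      rw [repGo_cons, repGo_cons]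
      by_cases hp : old.isPrefixOf (c :: t)
      · simp only [hp, if_true]
        rw [rep_acc old new f _ (new.reverse ++ acc), rep_acc old new f _ (new.reverse ++ [])]
        simp
      · simp only [hp]
        rw [rep_acc old new f t (c :: acc), rep_acc old new f t [c]]
        simp

-- accumulator extraction for splitOn.go
theorem split_acc (sep : List Char) : ∀ (fuel : Nat) (l cur : List Char) (acc : List (List Char)),
    PySem.Chars.splitOn.go sep fuel l cur acc = acc.reverse ++ PySem.Chars.splitOn.go sep fuel l cur []
  | 0, l, cur, acc => by simp [splitGo_zero]
  | f+1, [], cur, acc => by simp [splitGo_nil]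
  | f+1, c :: t, cur, acc => by
      rw [splitGo_cons, splitGo_cons]
      by_cases hp : sep.isPrefixOf (c :: t)
      · simp only [hp, if_true]
        rw [split_acc sep f _ [] (cur.reverse :: acc), split_acc sep f _ [] (cur.reverse :: [])]
        simp
      · simp only [hp]
        exact split_acc sep f t (c :: cur) acc

-- a nonempty prefix makes the drop strictly shorter
theorem drop_len_lt (old t : List Char) (c : Char) (h : old ≠ []) :
    (List.drop old.length (c :: t)).length < (c :: t).length := by
  have : 1 ≤ old.length := by cases old <;> simp_all
  simp [List.length_drop]; omega

-- fuel irrelevance for replace.go (old nonempty, enough fuel)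
theorem rep_fuel (old new : List Char) (h : old ≠ []) : ∀ (n : Nat) (l acc : List Char),
    l.length ≤ n → ∀ (f1 f2 : Nat), l.length ≤ f1 → l.length ≤ f2 →
    PySem.Chars.replace.go old new f1 l acc = PySem.Chars.replace.go old new f2 l acc := by
  intro n
  induction n with
  | zero =>
      intro l acc hl f1 f2 _ _
      have : l = [] := by cases l <;> simp_all
      subst this
      cases f1 <;> cases f2 <;> simp [repGo_zero, repGo_nil]
  | succ n ih =>
      intro l acc hl f1 f2 h1 h2
      cases l with
      | nil => cases f1 <;> cases f2 <;> simp [repGo_zero, repGo_nil]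
      | cons c t =>
          obtain ⟨f1', rfl⟩ : ∃ k, f1 = k + 1 := ⟨f1 - 1, by simp at h1; omega⟩
          obtain ⟨f2', rfl⟩ : ∃ k, f2 = k + 1 := ⟨f2 - 1, by simp at h2; omega⟩
          rw [repGo_cons, repGo_cons]
          by_cases hp : old.isPrefixOf (c :: t)
          · simp only [hp, if_true]
            have hlt := drop_len_lt old t c h
            exact ih _ _ (by simp_all; omega) f1' f2' (by simp_all; omega) (by simp_all; omega)
          · simp only [hp]
            exact ih t _ (by simp_all) f1' f2' (by simp_all) (by simp_all)

-- fuel irrelevance for splitOn.go (sep nonempty, enough fuel)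
theorem split_fuel (sep : List Char) (h : sep ≠ []) : ∀ (n : Nat) (l cur : List Char) (acc : List (List Char)),
    l.length ≤ n → ∀ (f1 f2 : Nat), l.length ≤ f1 → l.length ≤ f2 →
    PySem.Chars.splitOn.go sep f1 l cur acc = PySem.Chars.splitOn.go sep f2 l cur acc := by
  intro n
  induction n with
  | zero =>
      intro l cur acc hl f1 f2 _ _
      have : l = [] := by cases l <;> simp_all
      subst this
      cases f1 <;> cases f2 <;> simp [splitGo_zero, splitGo_nil]
  | succ n ih =>
      intro l cur acc hl f1 f2 h1 h2
      cases l with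
      | nil => cases f1 <;> cases f2 <;> simp [splitGo_zero, splitGo_nil]
      | cons c t =>
          obtain ⟨f1', rfl⟩ : ∃ k, f1 = k + 1 := ⟨f1 - 1, by simp at h1; omega⟩
          obtain ⟨f2', rfl⟩ : ∃ k, f2 = k + 1 := ⟨f2 - 1, by simp at h2; omega⟩
          rw [splitGo_cons, splitGo_cons]
          by_cases hp : sep.isPrefixOf (c :: t)
          · simp only [hp, if_true]
            have hlt := drop_len_lt sep t c h
            exact ih _ _ _ (by simp_all; omega) f1' f2' (by simp_all; omega) (by simp_all; omega)
          · simp only [hp]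
            exact ih t _ _ (by simp_all) f1' f2' (by simp_all) (by simp_all)

-- flattening the pieces of splitOn.go IS replace.go with the empty replacement
theorem flatten_splitGo (sep : List Char) : ∀ (fuel : Nat) (l cur : List Char) (acc : List (List Char)),
    (PySem.Chars.splitOn.go sep fuel l cur acc).flatten =
      acc.reverse.flatten ++ PySem.Chars.replace.go sep [] fuel l cur
  | 0, l, cur, acc => by simp [splitGo_zero, repGo_zero]
  | f+1, [], cur, acc => by simp [splitGo_nil, repGo_nil]
  | f+1, c :: t, cur, acc => by
      rw [splitGo_cons, repGo_cons]
      by_cases hp : sep.isPrefixOf (c :: t)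
      · simp only [hp, if_true]
        rw [flatten_splitGo sep f _ [] (cur.reverse :: acc)]
        rw [rep_acc sep [] f _ (List.reverse [] ++ cur)]
        simp
      · simp only [hp]
        exact flatten_splitGo sep f t (c :: cur) acc

-- find.go offset: the scan either fails for every start offset or succeeds at a fixed distance
theorem find_offset (sub : List Char) : ∀ (l : List Char) (k : Nat),
    (PySem.Chars.find.go sub l k = -1 ∧ PySem.Chars.find.go sub l 0 = -1) ∨
    (∃ i : Nat, PySem.Chars.find.go sub l 0 = (i : Int) ∧ PySem.Chars.find.go sub l k = (i : Int) + k)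
  | [], k => by
      by_cases he : sub.isEmpty
      · exact Or.inr ⟨0, by simp [findGo_nil, he]⟩
      · exact Or.inl (by simp [findGo_nil, he])
  | c :: t, k => by
      by_cases hp : sub.isPrefixOf (c :: t)
      · exact Or.inr ⟨0, by simp [findGo_cons, hp]⟩
      · rw [findGo_cons, findGo_cons]
        simp only [hp]
        rcases find_offset sub t (k+1) with ⟨h1, h0⟩ | ⟨i, h0, hk⟩
        · left
          rcases find_offset sub t 1 with ⟨g1, _⟩ | ⟨j, g0, g1⟩
          · exact ⟨h1, g1⟩
          · rw [g0] at h0; omega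
        · right
          rcases find_offset sub t 1 with ⟨g1, g0⟩ | ⟨j, g0, g1⟩
          · rw [g0] at h0; omega
          · refine ⟨j + 1, by push_cast [g1]; ring, ?_⟩
            rw [g0] at h0
            have : (j : Int) = i := by omega
            rw [hk]; push_cast; omega

-- splitOn.go through the first occurrence reported by find.go
theorem split_eq_find (sep : List Char) (hs : sep ≠ []) : ∀ (l : List Char) (fuel : Nat),
    l.length ≤ fuel → ∀ (cur : List Char) (acc : List (List Char)),
    PySem.Chars.splitOn.go sep fuel l cur acc =
      if PySem.Chars.find.go sep l 0 = -1 then acc.reverse ++ [cur.reverse ++ l]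
      else acc.reverse ++ (cur.reverse ++ l.take (PySem.Chars.find.go sep l 0).toNat) ::
            PySem.Chars.splitOn (l.drop ((PySem.Chars.find.go sep l 0).toNat + sep.length)) sep
  | [], fuel => by
      intro _ cur acc
      have he : sep.isEmpty = false := by cases sep <;> simp_all
      have hf : PySem.Chars.find.go sep [] 0 = -1 := by simp [findGo_nil, he]
      rw [hf]
      cases fuel <;> simp [splitGo_zero, splitGo_nil]
  | c :: t, fuel => by
      intro hl cur acc
      obtain ⟨f, rfl⟩ : ∃ k, fuel = k + 1 := ⟨fuel - 1, by simp at hl; omega⟩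
      rw [splitGo_cons]
      by_cases hp : sep.isPrefixOf (c :: t)
      · have hf : PySem.Chars.find.go sep (c :: t) 0 = 0 := by simp [findGo_cons, hp]
        simp only [hp, if_true, hf]
        rw [split_acc]
        have hsl : 1 ≤ sep.length := by cases sep <;> simp_all
        have hlen : (List.drop sep.length (c :: t)).length ≤ f := by
          simp only [List.length_drop, List.length_cons] at *; omega
        rw [split_fuel sep hs (List.drop sep.length (c :: t)).length _ []
              [] le_rfl f ((List.drop sep.length (c :: t)).length + 1) hlen (by omega)]
        rw [PySem.Chars.splitOn]
        norm_num
      · have hf : PySem.Chars.find.go sep (c :: t) 0 = PySem.Chars.find.go sep t 1 := by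
          simp [findGo_cons, hp]
        simp only [hp]
        have ht : t.length ≤ f := by simp at hl; omega
        rw [split_eq_find sep hs t f ht (c :: cur) acc]
        rcases find_offset sep t 1 with ⟨h1, h0⟩ | ⟨i, h0, h1⟩
        · rw [h0, hf, h1]
          simp
        · have hne : PySem.Chars.find.go sep t 0 ≠ -1 := by rw [h0]; omega
          have hne' : PySem.Chars.find.go sep (c :: t) 0 ≠ -1 := by rw [hf, h1]; omega
          rw [if_neg hne, if_neg hne', hf, h1, h0]
          have h4 : ((i : Int) + ((1 : Nat) : Int)).toNat = i + 1 := by omega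
          have h5 : ((i : Int)).toNat = i := by omega
          rw [h4, h5]
          simp [List.take_succ_cons, List.drop_succ_cons, Nat.add_right_comm]

-- A's accumulation loop after the first piece just concatenates the remaining pieces
theorem fold_tail : ∀ (rest : List (List Char)) (acc : List Char) (c : Int), 1 ≤ c →
    (rest.foldl addModalStep (acc, c)).1 = acc ++ rest.flatten
  | [], acc, c => by simp
  | s :: rest, acc, c => fun hc => by
      have hc0 : ((c : Int) == 0) = false := by simp; omega
      simp only [List.foldl_cons, addModalStep, hc0, Bool.false_eq_true, if_false]
      rw [fold_tail rest _ (c + 1) (by omega)]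
      simp

theorem sepL_ne : ("</body>".toList : List Char) ≠ [] := by decide

theorem sepL_len : ("</body>".toList : List Char).length = 7 := by decide

theorem addModal_spec : Claim_equal_addModal := by
  unfold Claim_equal_addModal Spec_addModal
  intro data _
  unfold addModal addModal_alt
  by_cases hf : PySem.Chars.find data.toList "</body>".toList = -1
  · have hni : ¬ ("</body>".toList <:+: data.toList) := (PySem.Chars.find_eq_neg_one_iff _ _).mp hf
    have hin : PySem.Str.isIn "</body>" data = false := by
      simp only [PySem.Str.isIn_eq]
      exact (PySem.Chars.isIn_eq_false_iff _ _).mpr hni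
    have hbq : (PySem.Chars.find data.toList "</body>".toList == -1) = true := by
      rw [hf]; rfl
    rw [hin, hbq]
    simp
  · have hinf : "</body>".toList <:+: data.toList := by
      by_contra hni
      exact hf ((PySem.Chars.find_eq_neg_one_iff _ _).mpr hni)
    have hin : PySem.Str.isIn "</body>" data = true := by
      simp only [PySem.Str.isIn_eq]
      exact (PySem.Chars.isIn_iff_infix _ _).mpr hinf
    have hnn : 0 ≤ PySem.Chars.find data.toList "</body>".toList :=
      (PySem.Chars.find_nonneg_iff _ _).mpr hinf
    obtain ⟨n, hn⟩ : ∃ n : Nat, PySem.Chars.find data.toList "</body>".toList = (n : Int) :=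
      ⟨(PySem.Chars.find data.toList "</body>".toList).toNat, by omega⟩
    have hgo : PySem.Chars.find.go "</body>".toList data.toList 0 = (n : Int) := by
      rw [← PySem.Chars.find]; exact hn
    have hsplit : PySem.Chars.splitOn data.toList "</body>".toList
        = data.toList.take n :: PySem.Chars.splitOn (data.toList.drop (n + 7)) "</body>".toList := by
      rw [PySem.Chars.splitOn,
          split_eq_find _ sepL_ne data.toList (data.toList.length + 1) (by omega) [] []]
      rw [hgo, if_neg (by omega)]
      have hN : ((n : Int)).toNat = n := by omega
      rw [hN, sepL_len]
      simp
    have hrep : (PySem.Chars.splitOn (data.toList.drop (n + 7)) "</body>".toList).flatten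
        = PySem.Chars.replace (data.toList.drop (n + 7)) "</body>".toList [] := by
      rw [PySem.Chars.splitOn,
          flatten_splitGo "</body>".toList ((data.toList.drop (n + 7)).length + 1) _ [] []]
      rw [PySem.Chars.replace]
      have he : ("</body>".toList : List Char).isEmpty = false := by decide
      rw [he]
      simp only [Bool.false_eq_true, if_false]
      rw [rep_fuel _ [] sepL_ne ((data.toList.drop (n + 7)).length + 1) _ []
            (by omega) _ _ (by omega) le_rfl]
      simp
    have hbq : (PySem.Chars.find data.toList "</body>".toList == -1) = false := by
      rw [hn]
      simp only [beq_eq_false_iff_ne, ne_eq]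
      omega
    rw [hin, hbq]
    simp only [Bool.false_eq_true, if_false, if_true]
    rw [hsplit]
    have hstep : ∀ s : List Char,
        addModalStep ([], 0) s = (s ++ pvStatic.toList ++ "\n</body>".toList, 1) :=
      fun s => rfl
    rw [List.foldl_cons, hstep, fold_tail _ _ 1 le_rfl, hrep]
    have hN : ((n : Int)).toNat = n := by omega
    simp only [hn, hN, sepL_len, List.append_assoc]
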